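-- pv_equiv track=rewrite | github.com/IvanAnis777/Data-Intake-Service-DIS- | app/utils/idempotency.py | validate_idempotency_key
-- ===== SOURCE A (Python) =====
-- IDEMPOTENCY_KEY_MAX_LENGTH = 255
--
-- IDEMPOTENCY_KEY_MIN_LENGTH = 1
--
-- def validate_idempotency_key(key: str) -> bool:
--     """
--     Валидирует формат ключа идемпотентности
--
--     Args:
--         key: Ключ идемпотентности
--
--     Returns:
--         True если ключ валидный, False иначе
--     """
--     if not key:
--         return False
--
--     if len(key) < IDEMPOTENCY_KEY_MIN_LENGTH or len(key) > IDEMPOTENCY_KEY_MAX_LENGTH: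
--         return False
--
--     # Разрешены буквы, цифры, дефис, подчёркивание
--     allowed_chars = set("abcdefghijklmnopqrstuvwxyzABCDEFGHIJKLMNOPQRSTUVWXYZ0123456789-_")
--     if not all(c in allowed_chars for c in key):
--         return False
--
--     return True
-- ===== SOURCE B (Python) =====
-- import re
--
-- _KEY_RE = re.compile(r'[A-Za-z0-9_-]{1,255}')
--
-- def validate_idempotency_key(key: str) -> bool:
--     return _KEY_RE.fullmatch(key) is not None
-- ===== Notes on version B (the rewrite author's own statement) =====
-- stated objective: idiomatic
-- what changed: Replaces the truthiness/length/per-character set-membership checks with a single anchored regular expression [A-Za-z0-9_-]{1,255} whose fullmatch decides validity in one pattern match.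
import Mathlib
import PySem

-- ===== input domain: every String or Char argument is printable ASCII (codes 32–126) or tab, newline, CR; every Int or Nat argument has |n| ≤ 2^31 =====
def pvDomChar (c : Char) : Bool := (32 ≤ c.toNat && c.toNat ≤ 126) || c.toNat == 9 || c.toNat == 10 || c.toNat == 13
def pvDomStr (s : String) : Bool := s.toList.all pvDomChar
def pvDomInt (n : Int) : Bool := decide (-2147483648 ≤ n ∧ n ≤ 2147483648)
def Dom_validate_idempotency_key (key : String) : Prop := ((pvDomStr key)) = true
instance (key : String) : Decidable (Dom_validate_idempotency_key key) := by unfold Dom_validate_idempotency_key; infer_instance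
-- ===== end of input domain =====

-- B re-implements the check as one anchored regular-expression match ([A-Za-z0-9_-]{1,255});
-- same results, idiomatic one-liner instead of separate truthiness/length/set-membership checks.

-- ===== PORT A =====
def IDEMPOTENCY_KEY_MAX_LENGTH : Int := 255
def IDEMPOTENCY_KEY_MIN_LENGTH : Int := 1

-- the characters of the Python string literal passed to set(...)
def pvAllowedList : List Char :=
  ['a','b','c','d','e','f','g','h','i','j','k','l','m','n','o','p','q','r','s','t','u','v','w','x','y','z',
   'A','B','C','D','E','F','G','H','I','J','K','L','M','N','O','P','Q','R','S','T','U','V','W','X','Y','Z',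
   '0','1','2','3','4','5','6','7','8','9','-','_']

def validate_idempotency_key (key : String) : Bool :=
  -- if not key: return False
  if key.toList.isEmpty then false
  -- if len(key) < MIN or len(key) > MAX: return False
  else if PySem.Str.len key < IDEMPOTENCY_KEY_MIN_LENGTH || PySem.Str.len key > IDEMPOTENCY_KEY_MAX_LENGTH then false
  else
    -- allowed_chars = set("..."); if not all(c in allowed_chars for c in key): return False
    let allowed_chars : PySem.Set Char := PySem.Set.ofList pvAllowedList
    if !(key.toList.all (fun c => PySem.Set.contains allowed_chars c)) then false
    else true

-- ===== PORT B =====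
-- Hand port of re.fullmatch(r'[A-Za-z0-9_-]{1,255}', key): exact for this pattern, an anchored
-- character class repeated {1,255} matches iff 1 ≤ len(key) ≤ 255 and every char is in the class.
def pvCharClass (c : Char) : Bool :=
  ('A' ≤ c && c ≤ 'Z') || ('a' ≤ c && c ≤ 'z') || ('0' ≤ c && c ≤ '9') || c == '_' || c == '-'

def validate_idempotency_key_alt (key : String) : Bool :=
  decide (1 ≤ key.toList.length) && decide (key.toList.length ≤ 255) && key.toList.all pvCharClass

-- ===== PRECONDITION & SPEC =====
def Spec_validate_idempotency_key (key : String) (out : Bool) : Prop := out = validate_idempotency_key_alt key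
instance (key : String) (out : Bool) : Decidable (Spec_validate_idempotency_key key out) := by unfold Spec_validate_idempotency_key; infer_instance

-- ===== CLAIM (what is proved, stated in full; the proofs are below) =====
def Claim_equal_validate_idempotency_key : Prop := ∀ (key : String), Dom_validate_idempotency_key key → Spec_validate_idempotency_key key (validate_idempotency_key key)

-- ===== LEMMAS AND PROOFS =====

theorem pv_valToNat (c : Char) : c.val.toNat = c.toNat := rfl

-- membership in A's allowed set coincides with B's character class, for every character
set_option maxRecDepth 8192 in
theorem pv_contains_eq_class (c : Char) :
    PySem.Set.contains (PySem.Set.ofList pvAllowedList) c = pvCharClass c := by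
  have h1 : PySem.Set.ofList pvAllowedList = pvAllowedList := by decide
  rw [h1, Bool.eq_iff_iff]
  simp only [pvAllowedList, pvCharClass, PySem.Set.contains_eq_listContains, List.contains_cons,
    List.contains_nil, Bool.or_false, Bool.or_eq_true, Bool.and_eq_true, beq_iff_eq,
    decide_eq_true_eq, Char.ext_iff, UInt32.ext_iff, Char.le_def, UInt32.le_iff_toNat_le,
    pv_valToNat]
  simp only [Char.reduceToNat]
  omega

theorem pv_ports_agree (key : String) :
    validate_idempotency_key key = validate_idempotency_key_alt key := by
  unfold validate_idempotency_key validate_idempotency_key_alt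
  simp only [pv_contains_eq_class, PySem.Str.len_eq, IDEMPOTENCY_KEY_MIN_LENGTH,
    IDEMPOTENCY_KEY_MAX_LENGTH]
  split_ifs with h1 h2 h3
  · -- empty string: both false
    have h0 : key.toList.length = 0 := by
      simpa [List.isEmpty_iff, List.length_eq_zero_iff] using h1
    simp [h0]
  · -- length out of [1,255]: both false
    have h0 : key.toList.length ≠ 0 := by
      simpa [List.isEmpty_iff, List.length_eq_zero_iff] using h1
    simp only [Bool.or_eq_true, decide_eq_true_eq] at h2
    have hc : ¬ key.toList.length ≤ 255 := by omega
    rw [String.length_toList] at hc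
    simp [hc]
  · -- a disallowed character: both false
    simp only [Bool.not_eq_eq_eq_not, Bool.not_true] at h3
    simp [h3]
  · -- valid key: both true
    have h0 : key.toList.length ≠ 0 := by
      simpa [List.isEmpty_iff, List.length_eq_zero_iff] using h1
    simp only [Bool.or_eq_true, decide_eq_true_eq, not_or, not_lt] at h2
    have h3' : (key.toList.all fun c => pvCharClass c) = true := by
      revert h3; cases key.toList.all fun c => pvCharClass c <;> simp
    have ha : 1 ≤ key.toList.length := by omega
    have hb : key.toList.length ≤ 255 := by omega
    rw [String.length_toList] at ha hb
    simp [h3', ha, hb]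

-- ===== VERDICT (by name: the statement is the Claim_ definition above) =====
theorem validate_idempotency_key_spec : Claim_equal_validate_idempotency_key := by
  intro key _
  unfold Spec_validate_idempotency_key
  exact pv_ports_agree key
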